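-- pv_equiv track=rewrite | github.com/lseman/logician | skills/svg/svg_viz/scripts/svg_viz.py | _tree_positions_recursive
-- ===== SOURCE A (Python) =====
-- def _tree_positions_recursive(
--     node: str,
--     children: dict[str, list[str]],
--     depth: int,
--     counter: dict[str, int],
--     node_h: int,
--     v_gap: int,
--     h_indent: int,
-- ) -> dict[str, tuple[int, int]]:
--     pos: dict[str, tuple[int, int]] = {}
--     x = 40 + depth * h_indent
--     y = 60 + counter["row"] * (node_h + v_gap)
--     pos[node] = (x, y)
--     counter["row"] += 1
--     for child in children.get(node, []):
--         pos.update(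
--             _tree_positions_recursive(
--                 child, children, depth + 1, counter, node_h, v_gap, h_indent
--             )
--         )
--     return pos
-- ===== SOURCE B (Python) =====
-- def _tree_positions_recursive(
--     node: str,
--     children: dict[str, list[str]],
--     depth: int,
--     counter: dict[str, int],
--     node_h: int,
--     v_gap: int,
--     h_indent: int,
-- ) -> dict[str, tuple[int, int]]:
--     # Explicit-stack pre-order traversal; children pushed reversed so they pop
--     # left-to-right.  Rows are assigned by the closed form row0 + i, and the
--     # shared counter is bumped once by the number of visited nodes (the same
--     # net mutation A performs one step at a time).
--     order: list[tuple[str, int]] = []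
--     stack = [(node, depth)]
--     while stack:
--         n, d = stack.pop()
--         order.append((n, d))
--         stack.extend((c, d + 1) for c in reversed(children.get(n, [])))
--     row0 = counter["row"]
--     counter["row"] = row0 + len(order)
--     return {
--         n: (40 + d * h_indent, 60 + (row0 + i) * (node_h + v_gap))
--         for i, (n, d) in enumerate(order)
--     }
-- ===== Notes on version B (the rewrite author's own statement) =====
-- stated objective: alternative
-- what changed: Replaces the recursion that builds and dict-merges per-subtree position dicts while mutating the counter at every node by an iterative explicit-stack pre-order traversal that first collects the flat (node, depth) visit list, then assigns rows by the closed form row0 + i in a single dict comprehension and bumps the counter once.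
import Mathlib
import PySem

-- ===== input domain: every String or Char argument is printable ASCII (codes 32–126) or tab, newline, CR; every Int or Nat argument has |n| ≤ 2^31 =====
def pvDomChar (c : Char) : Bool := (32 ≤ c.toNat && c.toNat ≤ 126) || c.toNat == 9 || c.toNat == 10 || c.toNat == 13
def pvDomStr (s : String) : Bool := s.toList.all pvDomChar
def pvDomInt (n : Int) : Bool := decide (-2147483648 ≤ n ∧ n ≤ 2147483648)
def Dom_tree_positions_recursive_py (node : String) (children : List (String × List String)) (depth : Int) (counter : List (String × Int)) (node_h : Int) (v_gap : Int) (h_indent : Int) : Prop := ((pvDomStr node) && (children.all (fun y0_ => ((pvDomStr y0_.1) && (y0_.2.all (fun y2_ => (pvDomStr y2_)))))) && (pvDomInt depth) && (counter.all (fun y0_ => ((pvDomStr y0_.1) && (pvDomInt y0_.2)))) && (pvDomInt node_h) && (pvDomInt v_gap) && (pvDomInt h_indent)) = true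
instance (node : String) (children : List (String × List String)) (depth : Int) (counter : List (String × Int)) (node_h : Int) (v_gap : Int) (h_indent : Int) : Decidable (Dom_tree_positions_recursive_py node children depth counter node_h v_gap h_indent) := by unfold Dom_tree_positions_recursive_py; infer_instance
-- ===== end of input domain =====

-- B replaces A's recursive dict-merging traversal by an explicit-stack pre-order pass plus a
-- single closed-form row assignment (objective: alternative decomposition, same cost).
-- Both Pythons mutate counter["row"] identically (A: +1 per node, B: +len(order) once); the
-- equivalence proved here is about the RETURN value.

-- ===== PORT A =====
-- children.get(v, []) on the association list (first match, Python dict lookup)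
def tprNbrs (children : List (String × List String)) (v : String) : List String :=
  (PySem.Dict.mk children).getD v []

-- fuel makes the recursion total; under Pre_ (acyclic reachable part) it is never exhausted,
-- so this is A's recursion step for step.  counter["row"] is read with getD 0: Pre_ guarantees
-- the key is present (Python raises KeyError otherwise).
def tprAgo (children : List (String × List String)) (node_h v_gap h_indent : Int) :
    Nat → String → Int → PySem.Dict String Int →
    PySem.Dict String (Int × Int) × PySem.Dict String Int
  | 0, _, _, cnt => (PySem.Dict.empty, cnt)
  | fuel+1, v, d, cnt =>
    let x := 40 + d * h_indent
    let y := 60 + cnt.getD "row" 0 * (node_h + v_gap)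
    let pos := PySem.Dict.empty.insert v (x, y)
    let cnt1 := cnt.insert "row" (cnt.getD "row" 0 + 1)
    (tprNbrs children v).foldl
      (fun st c =>
        let r := tprAgo children node_h v_gap h_indent fuel c (d + 1) st.2
        (PySem.Dict.update st.1 r.1.items, r.2))
      (pos, cnt1)

-- every vertex that can ever appear: the start node, all keys and all listed children
def tprVerts (node : String) (children : List (String × List String)) : List String :=
  node :: children.flatMap (fun p => p.1 :: p.2)

def tree_positions_recursive_py (node : String) (children : List (String × List String)) (depth : Int) (counter : List (String × Int)) (node_h : Int) (v_gap : Int) (h_indent : Int) : List (String × Int × Int) :=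
  (tprAgo children node_h v_gap h_indent (tprVerts node children).length node depth
      (PySem.Dict.mk counter)).1.items

-- ===== PORT B =====
-- the while-stack loop of Source B; the stack is held top-first, so Python's
-- stack.extend(reversed(children.get(n, []))) is prepending the children in order.
-- fuel = an upper bound on the number of iterations, never exhausted under Pre_.
def tprBloop (children : List (String × List String)) :
    Nat → List (String × Int) → List (String × Int) → List (String × Int)
  | 0, order, _ => order
  | _+1, order, [] => order
  | fuel+1, order, (n, d) :: rest =>
      tprBloop children fuel (order ++ [(n, d)])
        ((tprNbrs children n).map (fun c => (c, d + 1)) ++ rest)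

-- iteration bound for the stack loop (size of the unfolded tree, depth-limited)
def tprSize (children : List (String × List String)) : Nat → String → Nat
  | 0, _ => 1
  | fuel+1, v => 1 + ((tprNbrs children v).map (tprSize children fuel)).sum

def tree_positions_recursive_py_alt (node : String) (children : List (String × List String)) (depth : Int) (counter : List (String × Int)) (node_h : Int) (v_gap : Int) (h_indent : Int) : List (String × Int × Int) :=
  let order := tprBloop children (tprSize children (tprVerts node children).length node)
      [] [(node, depth)]
  let row0 := (PySem.Dict.mk counter).getD "row" 0
  ((PySem.List.enumerate order 0).foldl
      (fun pos e => pos.insert e.2.1 (40 + e.2.2 * h_indent, 60 + (row0 + e.1) * (node_h + v_gap)))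
      PySem.Dict.empty).items

-- ===== PRECONDITION & SPEC =====
-- one expansion step of the set of vertices reachable via children lists
def tprStep (children : List (String × List String)) (s : List String) : List String :=
  PySem.Set.ofList (s ++ s.flatMap (tprNbrs children))

def tprReach (children : List (String × List String)) : Nat → List String → List String
  | 0, s => s
  | n+1, s => tprStep children (tprReach children n s)

-- Pre_ = Python A returns normally: counter has the key "row" (else KeyError) and no vertex
-- reachable from node lies on a cycle (else the recursion never terminates, RecursionError).
def Pre_tree_positions_recursive_py (node : String) (children : List (String × List String)) (depth : Int) (counter : List (String × Int)) (node_h : Int) (v_gap : Int) (h_indent : Int) : Prop :=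
  (PySem.Dict.mk counter).contains "row" = true ∧
  ∀ v ∈ tprReach children (tprVerts node children).length [node],
    v ∉ tprReach children (tprVerts node children).length (tprNbrs children v)

instance (node : String) (children : List (String × List String)) (depth : Int) (counter : List (String × Int)) (node_h : Int) (v_gap : Int) (h_indent : Int) : Decidable (Pre_tree_positions_recursive_py node children depth counter node_h v_gap h_indent) := by unfold Pre_tree_positions_recursive_py; infer_instance

def pvWitness_tree_positions_recursive_py : String × (List (String × List String)) × Int × (List (String × Int)) × Int × Int × Int :=
  ("a", [("a", ["b", "c"]), ("b", ["d"])], 0, [("row", 0)], 10, 4, 20)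

def Spec_tree_positions_recursive_py (node : String) (children : List (String × List String)) (depth : Int) (counter : List (String × Int)) (node_h : Int) (v_gap : Int) (h_indent : Int) (out : List (String × Int × Int)) : Prop := out = tree_positions_recursive_py_alt node children depth counter node_h v_gap h_indent
instance (node : String) (children : List (String × List String)) (depth : Int) (counter : List (String × Int)) (node_h : Int) (v_gap : Int) (h_indent : Int) (out : List (String × Int × Int)) : Decidable (Spec_tree_positions_recursive_py node children depth counter node_h v_gap h_indent out) := by unfold Spec_tree_positions_recursive_py; infer_instance

-- ===== CLAIM (what is proved, stated in full; the proofs are below) =====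
def Claim_equal_tree_positions_recursive_py : Prop := ∀ (node : String) (children : List (String × List String)) (depth : Int) (counter : List (String × Int)) (node_h : Int) (v_gap : Int) (h_indent : Int), Dom_tree_positions_recursive_py node children depth counter node_h v_gap h_indent → Pre_tree_positions_recursive_py node children depth counter node_h v_gap h_indent → Spec_tree_positions_recursive_py node children depth counter node_h v_gap h_indent (tree_positions_recursive_py node children depth counter node_h v_gap h_indent)

-- ===== LEMMAS AND PROOFS =====

-- recursion-depth bound: the traversal from v terminates within n levels
def tprDOK (children : List (String × List String)) : Nat → String → Bool
  | 0, _ => false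
  | n+1, v => (tprNbrs children v).all (tprDOK children n)

-- the pre-order visit sequence with depths, fuel-limited like the ports
def tprPre (children : List (String × List String)) : Nat → String → Int → List (String × Int)
  | 0, _, _ => []
  | n+1, v, d => (v, d) :: (tprNbrs children v).flatMap (fun c => tprPre children n c (d + 1))

-- row-threaded coordinate assignment along a visit sequence
def tprAssign (node_h v_gap h_indent : Int) : List (String × Int) → Int → List (String × (Int × Int))
  | [], _ => []
  | (v, d) :: rest, r =>
      (v, (40 + d * h_indent, 60 + r * (node_h + v_gap))) ::
        tprAssign node_h v_gap h_indent rest (r + 1)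

-- insert a list of pairs into a dict, left to right
def dIns (p : PySem.Dict String (Int × Int)) (l : List (String × (Int × Int))) :
    PySem.Dict String (Int × Int) :=
  l.foldl (fun d kv => d.insert kv.1 kv.2) p

lemma tprDOK_mono (ch : List (String × List String)) :
    ∀ n v, tprDOK ch n v = true → tprDOK ch (n+1) v = true := by
  intro n
  induction n with
  | zero => intro v h; simp [tprDOK] at h
  | succ n ih =>
    intro v h
    rw [tprDOK, List.all_eq_true] at h ⊢
    exact fun c hc => ih c (h c hc)

lemma tprPre_stable (ch : List (String × List String)) :
    ∀ n m v d, tprDOK ch n v = true → n ≤ m → tprPre ch m v d = tprPre ch n v d := by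
  intro n
  induction n with
  | zero => intro m v d h; simp [tprDOK] at h
  | succ n ih =>
    intro m v d h hnm
    obtain ⟨m, rfl⟩ := Nat.exists_eq_add_of_le hnm
    rw [tprDOK, List.all_eq_true] at h
    have e : n + 1 + m = (n + m) + 1 := by omega
    rw [e]
    simp only [tprPre, List.cons.injEq, true_and]
    apply List.flatMap_congr
    intro c hc
    exact ih (n + m) c (d + 1) (h c hc) (by omega)

lemma tprSize_stable (ch : List (String × List String)) :
    ∀ n m v, tprDOK ch n v = true → n ≤ m → tprSize ch m v = tprSize ch n v := by
  intro n
  induction n with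
  | zero => intro m v h; simp [tprDOK] at h
  | succ n ih =>
    intro m v h hnm
    obtain ⟨m, rfl⟩ := Nat.exists_eq_add_of_le hnm
    rw [tprDOK, List.all_eq_true] at h
    have e : n + 1 + m = (n + m) + 1 := by omega
    rw [e]
    simp only [tprSize]
    congr 2
    apply List.map_congr_left
    intro c hc
    exact ih (n + m) c (h c hc) (by omega)

lemma tprSize_pos (ch : List (String × List String)) : ∀ n v, 1 ≤ tprSize ch n v := by
  intro n v; cases n <;> simp [tprSize]

lemma tprAssign_append (nh vg hi : Int) :
    ∀ s t r, tprAssign nh vg hi (s ++ t) r =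
      tprAssign nh vg hi s r ++ tprAssign nh vg hi t (r + s.length) := by
  intro s
  induction s with
  | nil => intro t r; simp [tprAssign]
  | cons hd tl ih =>
    intro t r
    obtain ⟨v, d⟩ := hd
    simp only [List.cons_append, tprAssign, ih, List.length_cons]
    have e2 : r + 1 + (tl.length : Int) = r + ((tl.length : Int) + 1) := by ring
    rw [e2]
    push_cast
    ring_nf

lemma dIns_cons (p : PySem.Dict String (Int × Int)) (kv : String × (Int × Int)) (l) :
    dIns p (kv :: l) = dIns (p.insert kv.1 kv.2) l := rfl

lemma dIns_append (p : PySem.Dict String (Int × Int)) (l₁ l₂) :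
    dIns p (l₁ ++ l₂) = dIns (dIns p l₁) l₂ := List.foldl_append ..

lemma insert_comm_of_contains (q : PySem.Dict String (Int × Int)) (k a : String)
    (x b : Int × Int) (hk : q.contains k = true) (hne : a ≠ k) :
    (q.insert k x).insert a b = (q.insert a b).insert k x := by
  apply PySem.Dict.ext
  by_cases ha : q.contains a = true
  · rw [PySem.Dict.items_insert_of_contains _ b (by rw [PySem.Dict.contains_insert, ha, Bool.or_true]),
        PySem.Dict.items_insert_of_contains _ x hk,
        PySem.Dict.items_insert_of_contains _ x (by rw [PySem.Dict.contains_insert, hk]; simp),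
        PySem.Dict.items_insert_of_contains _ b ha, List.map_map, List.map_map]
    apply List.map_congr_left
    intro p _
    by_cases h1 : p.1 = k
    · simp [h1, Ne.symm hne]
    · by_cases h2 : p.1 = a <;> simp [h1, h2, hne]
  · have ha' : q.contains a = false := by simpa using ha
    rw [PySem.Dict.items_insert_of_not_contains _ b
          (by rw [PySem.Dict.contains_insert, ha']; simp [hne]),
        PySem.Dict.items_insert_of_contains _ x hk,
        PySem.Dict.items_insert_of_contains _ x
          (by rw [PySem.Dict.contains_insert, hk]; simp),
        PySem.Dict.items_insert_of_not_contains _ b ha', List.map_append]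
    simp [hne]

lemma dIns_insert_comm :
    ∀ (t : List (String × (Int × Int))) (q : PySem.Dict String (Int × Int)) (k : String) (x : Int × Int),
      q.contains k = true → k ∉ t.map Prod.fst →
      dIns (q.insert k x) t = (dIns q t).insert k x := by
  intro t
  induction t with
  | nil => intro q k x _ _; rfl
  | cons ab t ih =>
    intro q k x hk hnot
    simp only [List.map_cons, List.mem_cons] at hnot
    push Not at hnot
    obtain ⟨hne, hnot'⟩ := hnot
    rw [dIns_cons, dIns_cons,
        insert_comm_of_contains q k ab.1 x ab.2 hk (fun h => hne h.symm),
        ih (q.insert ab.1 ab.2) k x (by rw [PySem.Dict.contains_insert, hk]; simp) hnot']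

lemma dIns_items_insert :
    ∀ (l : List (String × (Int × Int))) (p : PySem.Dict String (Int × Int)) (k : String) (x : Int × Int),
      (l.map Prod.fst).Nodup →
      dIns p ((PySem.Dict.mk l).insert k x).items = (dIns p l).insert k x := by
  intro l
  induction l with
  | nil =>
    intro p k x _
    rw [PySem.Dict.items_insert_of_not_contains _ x (by simp [PySem.Dict.contains_mk])]
    rfl
  | cons ab t ih =>
    intro p k x hnd
    simp only [List.map_cons, List.nodup_cons] at hnd
    obtain ⟨hab, hnd'⟩ := hnd
    by_cases hk : ab.1 = k
    · -- head key is the inserted key: replaced in place, tail untouched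
      have hc : (PySem.Dict.mk (ab :: t)).contains k = true := by
        simp [PySem.Dict.contains_mk, hk]
      rw [PySem.Dict.items_insert_of_contains _ x hc]
      have hmap : List.map (fun q => if (q.1 == k) = true then (k, x) else q) (ab :: t)
          = (k, x) :: t := by
        simp only [List.map_cons]
        rw [if_pos (by simp [hk])]
        congr 1
        conv_rhs => rw [← List.map_id t]
        apply List.map_congr_left
        intro q hq
        have hq1 : q.1 ≠ k := by
          intro h
          exact hab (by rw [hk, ← h]; exact List.mem_map_of_mem hq)
        simp [hq1]
      rw [hmap, dIns_cons, dIns_cons, hk,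
          ← PySem.Dict.insert_insert_self p k ab.2 x]
      exact dIns_insert_comm t (p.insert k ab.2) k x
        (by rw [PySem.Dict.contains_insert]; simp) (hk ▸ hab)
    · -- head key differs from the inserted key
      by_cases hct : (PySem.Dict.mk t).contains k = true
      · have hc : (PySem.Dict.mk (ab :: t)).contains k = true := by
          simp only [PySem.Dict.contains_mk] at hct ⊢
          simp [hct]
        rw [PySem.Dict.items_insert_of_contains _ x hc]
        have hmap : List.map (fun q => if (q.1 == k) = true then (k, x) else q) (ab :: t)
            = ab :: ((PySem.Dict.mk t).insert k x).items := by
          rw [PySem.Dict.items_insert_of_contains _ x hct]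
          simp only [List.map_cons]
          rw [if_neg (by simp [hk])]
        rw [hmap, dIns_cons, dIns_cons]
        exact ih (p.insert ab.1 ab.2) k x hnd'
      · have hct' : (PySem.Dict.mk t).contains k = false := eq_false_of_ne_true hct
        have hc : (PySem.Dict.mk (ab :: t)).contains k = false := by
          simp only [PySem.Dict.contains_mk] at hct' ⊢
          simp [hct', hk]
        rw [PySem.Dict.items_insert_of_not_contains _ x hc]
        have hmap : (ab :: t) ++ [(k, x)] = ab :: ((PySem.Dict.mk t).insert k x).items := by
          rw [PySem.Dict.items_insert_of_not_contains _ x hct']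
          rfl
        rw [hmap, dIns_cons, dIns_cons]
        exact ih (p.insert ab.1 ab.2) k x hnd'

lemma dIns_collapse :
    ∀ (l : List (String × (Int × Int))) (e p : PySem.Dict String (Int × Int)),
      e.keys.Nodup → dIns p (dIns e l).items = dIns (dIns p e.items) l := by
  intro l
  induction l with
  | nil => intro e p _; rfl
  | cons kv t ih =>
    intro e p hnd
    rw [dIns_cons, dIns_cons, ih (e.insert kv.1 kv.2) p (PySem.Dict.nodup_keys_insert e kv.1 kv.2 hnd)]
    congr 1
    have : (e.insert kv.1 kv.2) = (PySem.Dict.mk e.items).insert kv.1 kv.2 := rfl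
    rw [this, dIns_items_insert e.items p kv.1 kv.2 hnd]

lemma dIns_empty_collapse (l : List (String × (Int × Int))) (p : PySem.Dict String (Int × Int)) :
    dIns p (dIns PySem.Dict.empty l).items = dIns p l := by
  have h := dIns_collapse l PySem.Dict.empty p (by simp [PySem.Dict.empty, PySem.Dict.keys])
  simpa using h

-- ===== A-side characterization: A computes the insert-fold of the assigned pre-order list =====
lemma tprAgo_spec (ch : List (String × List String)) (nh vg hi : Int) :
    ∀ (f : Nat) (v : String), tprDOK ch f v = true → ∀ (d : Int) (cnt : PySem.Dict String Int),
      (tprAgo ch nh vg hi f v d cnt).1 =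
        dIns PySem.Dict.empty (tprAssign nh vg hi (tprPre ch f v d) (cnt.getD "row" 0)) ∧
      (tprAgo ch nh vg hi f v d cnt).2 =
        cnt.insert "row" (cnt.getD "row" 0 + (tprPre ch f v d).length) := by
  intro f
  induction f with
  | zero => intro v h; simp [tprDOK] at h
  | succ f ih =>
    intro v hdok d cnt
    rw [tprDOK, List.all_eq_true] at hdok
    have inner : ∀ (cs : List String), (∀ c ∈ cs, tprDOK ch f c = true) →
        ∀ (p : PySem.Dict String (Int × Int)) (cc : PySem.Dict String Int),
        cc.insert "row" (cc.getD "row" 0) = cc →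
        cs.foldl (fun st c =>
            (PySem.Dict.update st.1 (tprAgo ch nh vg hi f c (d + 1) st.2).1.items,
             (tprAgo ch nh vg hi f c (d + 1) st.2).2)) (p, cc)
          = (dIns p (tprAssign nh vg hi (cs.flatMap (fun c => tprPre ch f c (d + 1))) (cc.getD "row" 0)),
             cc.insert "row" (cc.getD "row" 0 + (cs.flatMap (fun c => tprPre ch f c (d + 1))).length)) := by
      intro cs
      induction cs with
      | nil =>
        intro _ p cc hcc
        simp only [List.foldl_nil, List.flatMap_nil, tprAssign, List.length_nil]
        rw [Nat.cast_zero, add_zero, hcc]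
        rfl
      | cons c cs ihc =>
        intro hall p cc hcc
        have hA := ih c (hall c (List.mem_cons_self ..)) (d + 1) cc
        rw [List.foldl_cons]
        have hstep :
            (PySem.Dict.update p (tprAgo ch nh vg hi f c (d + 1) cc).1.items,
             (tprAgo ch nh vg hi f c (d + 1) cc).2)
            = (dIns p (tprAssign nh vg hi (tprPre ch f c (d + 1)) (cc.getD "row" 0)),
               cc.insert "row" (cc.getD "row" 0 + (tprPre ch f c (d + 1)).length)) := by
          rw [hA.1, hA.2]
          congr 1
          exact dIns_empty_collapse _ p
        rw [hstep,
            ihc (fun c' hc' => hall c' (List.mem_cons_of_mem _ hc')) _ _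
              (by rw [PySem.Dict.getD_insert_self, PySem.Dict.insert_insert_self]),
            PySem.Dict.getD_insert_self, PySem.Dict.insert_insert_self]
        simp only [List.flatMap_cons, Prod.mk.injEq]
        constructor
        · rw [tprAssign_append, dIns_append]
        · congr 1
          push_cast [List.length_append]
          ring
    have h0 := inner (tprNbrs ch v) hdok
        (PySem.Dict.empty.insert v (40 + d * hi, 60 + cnt.getD "row" 0 * (nh + vg)))
        (cnt.insert "row" (cnt.getD "row" 0 + 1))
        (by rw [PySem.Dict.getD_insert_self, PySem.Dict.insert_insert_self])
    constructor
    · show ((tprNbrs ch v).foldl (fun st c =>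
            (PySem.Dict.update st.1 (tprAgo ch nh vg hi f c (d + 1) st.2).1.items,
             (tprAgo ch nh vg hi f c (d + 1) st.2).2))
          (PySem.Dict.empty.insert v (40 + d * hi, 60 + cnt.getD "row" 0 * (nh + vg)),
           cnt.insert "row" (cnt.getD "row" 0 + 1))).1 = _
      rw [h0, PySem.Dict.getD_insert_self]
      show dIns _ _ = dIns PySem.Dict.empty (tprAssign nh vg hi (tprPre ch (f + 1) v d) (cnt.getD "row" 0))
      rw [tprPre]
      rfl
    · show ((tprNbrs ch v).foldl (fun st c =>
            (PySem.Dict.update st.1 (tprAgo ch nh vg hi f c (d + 1) st.2).1.items,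
             (tprAgo ch nh vg hi f c (d + 1) st.2).2))
          (PySem.Dict.empty.insert v (40 + d * hi, 60 + cnt.getD "row" 0 * (nh + vg)),
           cnt.insert "row" (cnt.getD "row" 0 + 1))).2 = _
      have harith : cnt.getD "row" 0 + 1
            + (((tprNbrs ch v).flatMap fun c => tprPre ch f c (d + 1)).length : Int)
          = cnt.getD "row" 0 + ((tprPre ch (f + 1) v d).length : Int) := by
        rw [tprPre]
        push_cast [List.length_cons]
        ring
      rw [h0, PySem.Dict.getD_insert_self, PySem.Dict.insert_insert_self, harith]

-- ===== B-side characterization: the stack loop emits the pre-order list =====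
lemma tprBloop_spec (ch : List (String × List String)) (NN : Nat) :
    ∀ (fuel : Nat) (stack order : List (String × Int)),
      (∀ e ∈ stack, tprDOK ch NN e.1 = true) →
      (stack.map (fun e => tprSize ch NN e.1)).sum ≤ fuel →
      tprBloop ch fuel order stack =
        order ++ stack.flatMap (fun e => tprPre ch NN e.1 e.2) := by
  intro fuel
  induction fuel with
  | zero =>
    intro stack order hdok hsz
    cases stack with
    | nil => simp [tprBloop]
    | cons e rest =>
      exfalso
      simp only [List.map_cons, List.sum_cons, Nat.le_zero] at hsz
      have := tprSize_pos ch NN e.1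
      omega
  | succ f ihf =>
    intro stack order hdok hsz
    cases stack with
    | nil => simp [tprBloop]
    | cons e rest =>
      obtain ⟨n, d⟩ := e
      cases hNN : NN with
      | zero =>
        exfalso
        have := hdok (n, d) (List.mem_cons_self ..)
        rw [hNN] at this
        simp [tprDOK] at this
      | succ m =>
        subst hNN
        have hdn : tprDOK ch (m + 1) n = true := hdok (n, d) (List.mem_cons_self ..)
        have hkids : ∀ c ∈ tprNbrs ch n, tprDOK ch m c = true := by
          rw [tprDOK, List.all_eq_true] at hdn
          exact hdn
        rw [tprBloop]
        rw [ihf _ _ ?hd ?hs]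
        case hd =>
          intro e' he'
          rcases List.mem_append.mp he' with h | h
          · obtain ⟨c, hc, rfl⟩ := List.mem_map.mp h
            exact tprDOK_mono ch m c (hkids c hc)
          · exact hdok e' (List.mem_cons_of_mem _ h)
        case hs =>
          have hsz1 : tprSize ch (m + 1) n + (rest.map (fun e => tprSize ch (m + 1) e.1)).sum ≤ f + 1 := by
            simpa using hsz
          have hsn : tprSize ch (m + 1) n = 1 + ((tprNbrs ch n).map (tprSize ch m)).sum := by
            rw [tprSize]
          have hmap : ((tprNbrs ch n).map (fun c => (c, d + 1))).map (fun e => tprSize ch (m + 1) e.1)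
              = (tprNbrs ch n).map (tprSize ch m) := by
            rw [List.map_map]
            apply List.map_congr_left
            intro c hc
            exact tprSize_stable ch m (m + 1) c (hkids c hc) (by omega)
          rw [List.map_append, List.sum_append, hmap]
          omega
        -- now the emitted lists agree
        rw [List.append_assoc]
        congr 1
        have hpre_exp : tprPre ch (m + 1) n d
            = (n, d) :: (tprNbrs ch n).flatMap (fun c => tprPre ch (m + 1) c (d + 1)) := by
          rw [tprPre]
          congr 1
          apply List.flatMap_congr
          intro c hc
          exact (tprPre_stable ch m (m + 1) c (d + 1) (hkids c hc) (by omega)).symm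
        rw [List.flatMap_cons, hpre_exp, List.flatMap_append, List.flatMap_map]
        simp

lemma tprEnum_fold (nh vg hi row0 : Int) :
    ∀ (seq : List (String × Int)) (i0 : Int) (pos : PySem.Dict String (Int × Int)),
      (PySem.List.enumerate seq i0).foldl
          (fun pos e => pos.insert e.2.1 (40 + e.2.2 * hi, 60 + (row0 + e.1) * (nh + vg))) pos =
        dIns pos (tprAssign nh vg hi seq (row0 + i0)) := by
  intro seq
  induction seq with
  | nil => intro i0 pos; rw [PySem.List.enumerate_nil]; rfl
  | cons vd seq ih =>
    intro i0 pos
    obtain ⟨v, d⟩ := vd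
    rw [PySem.List.enumerate_cons, List.foldl_cons, tprAssign, dIns_cons, ih (i0 + 1) _,
        show row0 + (i0 + 1) = (row0 + i0) + 1 from by ring]

-- ===== graph argument: acyclicity of the reachable part bounds the recursion depth =====
lemma tprStep_mem (ch : List (String × List String)) (s : List String) (a : String) :
    a ∈ tprStep ch s ↔ a ∈ s ∨ ∃ b ∈ s, a ∈ tprNbrs ch b := by
  simp [tprStep, PySem.Set.mem_ofList, List.mem_append, List.mem_flatMap]

lemma tprReach_extensive (ch : List (String × List String)) :
    ∀ n (s : List String) a, a ∈ s → a ∈ tprReach ch n s := by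
  intro n
  induction n with
  | zero => intro s a h; exact h
  | succ n ih =>
    intro s a h
    rw [tprReach]
    exact (tprStep_mem ..).mpr (Or.inl (ih s a h))

lemma tprReach_mono_set (ch : List (String × List String)) :
    ∀ n (s t : List String), (∀ a ∈ s, a ∈ t) →
      ∀ a ∈ tprReach ch n s, a ∈ tprReach ch n t := by
  intro n
  induction n with
  | zero => intro s t hst a ha; exact hst a ha
  | succ n ih =>
    intro s t hst a ha
    rw [tprReach] at ha ⊢
    rcases (tprStep_mem ..).mp ha with h | ⟨b, hb, hab⟩
    · exact (tprStep_mem ..).mpr (Or.inl (ih s t hst a h))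
    · exact (tprStep_mem ..).mpr (Or.inr ⟨b, ih s t hst b hb, hab⟩)

lemma tprReach_mono_fuel (ch : List (String × List String)) :
    ∀ {n m : Nat} (s : List String) (a : String), n ≤ m →
      a ∈ tprReach ch n s → a ∈ tprReach ch m s := by
  intro n m s a h ha
  induction h with
  | refl => exact ha
  | step h' ih =>
    rw [tprReach]
    exact (tprStep_mem ..).mpr (Or.inl ih)

lemma tprReach_reach (ch : List (String × List String)) :
    ∀ n m (s : List String), tprReach ch n (tprReach ch m s) = tprReach ch (n + m) s := by
  intro n
  induction n with
  | zero => intro m s; rw [Nat.zero_add]; rfl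
  | succ n ih =>
    intro m s
    show tprStep ch (tprReach ch n (tprReach ch m s)) = _
    rw [ih m s, show n + 1 + m = (n + m) + 1 from by omega, tprReach]

lemma tprChain_mem_reach (ch : List (String × List String)) :
    ∀ (l : List String) (a b : String),
      List.IsChain (fun u w => w ∈ tprNbrs ch u) (a :: l) → b ∈ l →
      b ∈ tprReach ch l.length [a] := by
  intro l
  induction l with
  | nil => intro a b _ hb; simp at hb
  | cons c l ih =>
    intro a b hch hb
    rw [List.isChain_cons] at hch
    obtain ⟨hR, hch'⟩ := hch
    have hac : c ∈ tprNbrs ch a := hR c rfl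
    have hc1 : c ∈ tprReach ch 1 [a] := by
      rw [tprReach]
      exact (tprStep_mem ..).mpr (Or.inr ⟨a, tprReach_extensive ch 0 [a] a (List.mem_singleton.mpr rfl), hac⟩)
    rcases List.mem_cons.mp hb with rfl | hb'
    · exact tprReach_mono_fuel ch [a] b (Nat.succ_le_succ (Nat.zero_le _)) hc1
    · have hbl := ih c b hch' hb'
      have h2 : b ∈ tprReach ch l.length (tprReach ch 1 [a]) :=
        tprReach_mono_set ch l.length [c] (tprReach ch 1 [a])
          (by intro x hx; rw [List.mem_singleton] at hx; subst hx; exact hc1) b hbl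
      rw [tprReach_reach] at h2
      simpa using h2

lemma tprChain_of_not_dok (ch : List (String × List String)) :
    ∀ n v, tprDOK ch n v = false →
      ∃ l : List String, l.length = n ∧ List.IsChain (fun u w => w ∈ tprNbrs ch u) (v :: l) := by
  intro n
  induction n with
  | zero => intro v _; exact ⟨[], rfl, by simp⟩
  | succ n ih =>
    intro v h
    rw [tprDOK, List.all_eq_false] at h
    obtain ⟨c, hc, hdc⟩ := h
    obtain ⟨l, hlen, hch⟩ := ih c (by simpa using hdc)
    refine ⟨c :: l, by simp [hlen], ?_⟩
    rw [List.isChain_cons]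
    exact ⟨by intro y hy; rw [List.head?_cons, Option.mem_some_iff] at hy; subst hy; exact hc, hch⟩

lemma tprNbrs_sub_verts (node : String) (ch : List (String × List String)) :
    ∀ a b, b ∈ tprNbrs ch a → b ∈ tprVerts node ch := by
  intro a b hb
  unfold tprNbrs at hb
  rw [PySem.Dict.getD_eq_get?_getD] at hb
  cases hget : (PySem.Dict.mk ch).get? a with
  | none => rw [hget] at hb; simp at hb
  | some vs =>
    rw [hget] at hb
    simp only [Option.getD_some] at hb
    have hmem : (a, vs) ∈ ch := PySem.Dict.mem_items_of_get?_eq_some _ hget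
    unfold tprVerts
    exact List.mem_cons.mpr (Or.inr (List.mem_flatMap.mpr ⟨(a, vs), hmem, by simp [hb]⟩))

lemma tprReach_node_sub_verts (node : String) (ch : List (String × List String)) :
    ∀ n b, b ∈ tprReach ch n [node] → b ∈ tprVerts node ch := by
  intro n
  induction n with
  | zero =>
    intro b hb
    rw [show tprReach ch 0 [node] = [node] from rfl, List.mem_singleton] at hb
    subst hb
    exact List.mem_cons_self ..
  | succ n ih =>
    intro b hb
    rw [tprReach] at hb
    rcases (tprStep_mem ..).mp hb with h | ⟨c, _, hbc⟩
    · exact ih b h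
    · exact tprNbrs_sub_verts node ch c b hbc

lemma tprDOK_of_acyclic (node : String) (ch : List (String × List String))
    (hac : ∀ v ∈ tprReach ch (tprVerts node ch).length [node],
      v ∉ tprReach ch (tprVerts node ch).length (tprNbrs ch v)) :
    tprDOK ch (tprVerts node ch).length node = true := by
  set N := (tprVerts node ch).length with hN
  by_contra h
  obtain ⟨l, hlen, hch⟩ := tprChain_of_not_dok ch N node (eq_false_of_ne_true h)
  have hclos : ∀ b ∈ node :: l, b ∈ tprReach ch N [node] := by
    intro b hb
    rcases List.mem_cons.mp hb with hbn | hb'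
    · rw [hbn]
      exact tprReach_extensive ch N [node] node (List.mem_singleton.mpr rfl)
    · have hr := tprChain_mem_reach ch l node b hch hb'
      rw [hlen] at hr
      exact hr
  have hvert : ∀ b ∈ node :: l, b ∈ tprVerts node ch := fun b hb =>
    tprReach_node_sub_verts node ch N b (hclos b hb)
  have hnotnd : ¬ (node :: l).Nodup := by
    intro hnd
    have h2 : (node :: l).toFinset ⊆ (tprVerts node ch).toFinset := by
      intro x hx
      rw [List.mem_toFinset] at hx ⊢
      exact hvert x hx
    have h3 := Finset.card_le_card h2
    have h4 := List.toFinset_card_le (tprVerts node ch)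
    rw [List.toFinset_card_of_nodup hnd] at h3
    simp only [List.length_cons, hlen] at h3
    omega
  obtain ⟨x, hdup⟩ := List.exists_duplicate_iff_not_nodup.mpr hnotnd
  have hsub : List.Sublist [x, x] (node :: l) := List.duplicate_iff_sublist.mp hdup
  rw [List.cons_sublist_iff] at hsub
  obtain ⟨r₁, r₂, hL, hx1, hx2⟩ := hsub
  have hx2' : x ∈ r₂ := List.singleton_sublist.mp hx2
  obtain ⟨p₁, p₂, hr1⟩ := List.append_of_mem hx1
  obtain ⟨q₁, q₂, hr2⟩ := List.append_of_mem hx2'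
  subst hr1 hr2
  have hchain2 : List.IsChain (fun u w => w ∈ tprNbrs ch u) (x :: ((p₂ ++ q₁) ++ [x])) := by
    have hsuf : List.IsSuffix ((x :: ((p₂ ++ q₁) ++ [x])) ++ q₂) (node :: l) := by
      refine ⟨p₁, ?_⟩
      rw [hL]
      simp
    have hpre : List.IsPrefix (x :: ((p₂ ++ q₁) ++ [x])) ((x :: ((p₂ ++ q₁) ++ [x])) ++ q₂) :=
      List.prefix_append ..
    exact (hch.suffix hsuf).prefix hpre
  have hxc : x ∈ tprReach ch N [node] := hclos x (by rw [hL]; exact List.mem_append_left _ hx1)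
  apply hac x hxc
  cases hpq : p₂ ++ q₁ with
  | nil =>
    rw [hpq] at hchain2
    rw [show (([] : List String) ++ [x]) = [x] from rfl, List.isChain_cons] at hchain2
    have hxx : x ∈ tprNbrs ch x :=
      hchain2.1 x (by rw [List.head?_cons]; rfl)
    exact tprReach_extensive ch N _ x hxx
  | cons c m =>
    rw [hpq, List.cons_append, List.isChain_cons] at hchain2
    obtain ⟨hR1, hch3⟩ := hchain2
    have hxc' : c ∈ tprNbrs ch x := hR1 c (by rw [List.head?_cons]; rfl)
    have hmem : x ∈ m ++ [x] := List.mem_append_right _ (by simp)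
    have h5 := tprChain_mem_reach ch (m ++ [x]) c x hch3 hmem
    have h6 : x ∈ tprReach ch (m.length + 1) (tprNbrs ch x) := by
      have h7 := tprReach_mono_set ch (m ++ [x]).length [c] (tprNbrs ch x)
        (by intro y hy; rw [List.mem_singleton] at hy; subst hy; exact hxc') x h5
      simpa using h7
    apply tprReach_mono_fuel ch (tprNbrs ch x) x ?_ h6
    have hm : m.length + 1 = p₂.length + q₁.length := by
      have := congrArg List.length hpq
      simp at this
      omega
    have hLlen := congrArg List.length hL
    simp [List.length_append, hlen] at hLlen
    omega

-- ===== VERDICT (by name: the statement is the Claim_ definition above) =====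
theorem tree_positions_recursive_py_spec : Claim_equal_tree_positions_recursive_py := by
  intro node ch depth counter nh vg hi _ hpre
  obtain ⟨_, hac⟩ := hpre
  have hdok := tprDOK_of_acyclic node ch hac
  have hB : tprBloop ch (tprSize ch (tprVerts node ch).length node) [] [(node, depth)]
      = tprPre ch (tprVerts node ch).length node depth := by
    rw [tprBloop_spec ch (tprVerts node ch).length _ [(node, depth)] []
          (by intro e he; rw [List.mem_singleton] at he; subst he; exact hdok)
          (by simp)]
    simp
  show tree_positions_recursive_py node ch depth counter nh vg hi
      = tree_positions_recursive_py_alt node ch depth counter nh vg hi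
  have hAside : tree_positions_recursive_py node ch depth counter nh vg hi
      = (dIns PySem.Dict.empty (tprAssign nh vg hi (tprPre ch (tprVerts node ch).length node depth)
          ((PySem.Dict.mk counter).getD "row" 0))).items := by
    unfold tree_positions_recursive_py
    rw [(tprAgo_spec ch nh vg hi _ node hdok depth (PySem.Dict.mk counter)).1]
  have hBside : tree_positions_recursive_py_alt node ch depth counter nh vg hi
      = (dIns PySem.Dict.empty (tprAssign nh vg hi (tprPre ch (tprVerts node ch).length node depth)
          ((PySem.Dict.mk counter).getD "row" 0))).items := by
    show ((PySem.List.enumerate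
          (tprBloop ch (tprSize ch (tprVerts node ch).length node) [] [(node, depth)]) 0).foldl
        (fun pos e => pos.insert e.2.1 (40 + e.2.2 * hi,
            60 + ((PySem.Dict.mk counter).getD "row" 0 + e.1) * (nh + vg)))
        PySem.Dict.empty).items = _
    rw [hB, tprEnum_fold nh vg hi ((PySem.Dict.mk counter).getD "row" 0) _ 0 PySem.Dict.empty,
        add_zero]
  rw [hAside, hBside]
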